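-- pv_equiv track=rewrite | github.com/rahulnm-13/Recommendation_System | Recommend_Systems.py | new_cat3
-- ===== SOURCE A (Python) =====
-- def new_cat3(string):
--     ctr = 0
--     size = 0
--     for i in range(len(string)):
--         if(ctr==4):
--             break
--         if(string[i]=='>'):
--             ctr += 1
--         size += 1
--     return size-3
-- ===== SOURCE B (Python) =====
-- def new_cat3(string):
--     pos = [i for i, c in enumerate(string) if c == '>']
--     if len(pos) < 4:
--         return len(string) - 3
--     return pos[3] - 2
-- ===== Notes on version B (the rewrite author's own statement) =====
-- stated objective: idiomatic
-- what changed: Replaces the stateful count-and-break character scan with a comprehension collecting all '>' positions and indexing the 4th (pos[3]-2, or len-3 if fewer than four).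
import Mathlib
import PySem

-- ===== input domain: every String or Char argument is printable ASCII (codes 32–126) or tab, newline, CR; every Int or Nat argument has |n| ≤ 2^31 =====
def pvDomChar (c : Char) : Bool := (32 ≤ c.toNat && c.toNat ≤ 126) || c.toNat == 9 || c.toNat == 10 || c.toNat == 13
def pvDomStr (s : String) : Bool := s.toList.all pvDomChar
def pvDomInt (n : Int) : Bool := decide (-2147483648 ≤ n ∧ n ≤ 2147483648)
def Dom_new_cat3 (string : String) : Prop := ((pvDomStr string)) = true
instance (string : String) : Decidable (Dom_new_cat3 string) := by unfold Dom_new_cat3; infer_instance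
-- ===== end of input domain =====

-- B collects all '>' positions with a comprehension and indexes the 4th, instead of
-- A's stateful count-and-break character scan; objective: idiomatic, same cost.

-- ===== PORT A =====
-- the for-loop with its early break, ctr/size state as in the Python
def pvALoop : List Char → Int → Int → Int
  | [], _, size => size
  | c :: cs, ctr, size =>
    if ctr == 4 then size
    else pvALoop cs (if c == '>' then ctr + 1 else ctr) (size + 1)

def new_cat3 (string : String) : Int :=
  pvALoop string.toList 0 0 - 3

-- ===== PORT B =====
def new_cat3_alt (string : String) : Int :=
  let pos := (PySem.List.enumerate string.toList 0).filterMap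
    (fun ic => if ic.2 == '>' then some ic.1 else none)
  if pos.length < 4 then PySem.Str.len string - 3
  else (PySem.List.pyGet? pos 3).getD 0 - 2

-- ===== PRECONDITION & SPEC =====
def Spec_new_cat3 (string : String) (out : Int) : Prop := out = new_cat3_alt string
instance (string : String) (out : Int) : Decidable (Spec_new_cat3 string out) := by unfold Spec_new_cat3; infer_instance

-- ===== CLAIM (what is proved, stated in full; the proofs are below) =====
def Claim_equal_new_cat3 : Prop := ∀ (string : String), Dom_new_cat3 string → Spec_new_cat3 string (new_cat3 string)

-- ===== LEMMAS AND PROOFS =====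

-- number of characters A's loop consumes before stopping, with r '>'s still wanted
def pvScan : List Char → Nat → Nat
  | _, 0 => 0
  | [], _ + 1 => 0
  | c :: cs, r + 1 => 1 + pvScan cs (if c == '>' then r else r + 1)

-- positions of '>' in a list
def pvIdx : List Char → List Nat
  | [] => []
  | c :: cs => if c == '>' then 0 :: (pvIdx cs).map (· + 1) else (pvIdx cs).map (· + 1)

theorem pvALoop_eq_scan : ∀ (cs : List Char) (r : Nat) (size : Int), r ≤ 4 →
    pvALoop cs (4 - (r : Int)) size = size + pvScan cs r := by
  intro cs
  induction cs with
  | nil =>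
    intro r size _
    cases r <;> simp [pvALoop, pvScan]
  | cons c cs ih =>
    intro r size hr
    cases r with
    | zero => simp [pvALoop, pvScan]
    | succ r' =>
      have hne : ((4 - ((r' : Int) + 1) == 4) = false) := by
        simp; omega
      by_cases hc : c = '>'
      · have h1 : (4 : Int) - ((r' : Int) + 1) + 1 = 4 - (r' : Int) := by ring
        simp only [pvALoop, pvScan, Nat.cast_succ, hne, hc, if_true, if_false,
          Bool.false_eq_true, beq_self_eq_true, h1]
        rw [ih r' (size + 1) (by omega)]
        push_cast; ring
      · have hcb : ((c == '>') = false) := by simp [hc]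
        simp only [pvALoop, pvScan, Nat.cast_succ, hne, hcb, if_false,
          Bool.false_eq_true]
        rw [show (4 : Int) - ((r' : Int) + 1) = 4 - ((r' + 1 : Nat) : Int) by push_cast; ring,
          ih (r' + 1) (size + 1) (by omega)]
        push_cast; ring

theorem pvScan_idx : ∀ (cs : List Char) (r : Nat), 0 < r →
    pvScan cs r = ((pvIdx cs)[r - 1]?.map (· + 1)).getD cs.length := by
  intro cs
  induction cs with
  | nil => intro r hr; cases r <;> simp [pvScan, pvIdx] at *
  | cons c cs ih =>
    intro r hr
    cases r with
    | zero => omega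
    | succ r' =>
      by_cases hc : c = '>'
      · cases r' with
        | zero => simp [pvScan, pvIdx, hc]
        | succ r'' =>
          rw [show pvScan (c :: cs) (r'' + 1 + 1) = 1 + pvScan cs (r'' + 1) by
            simp [pvScan, hc]]
          rw [ih (r'' + 1) (by omega)]
          cases h : (pvIdx cs)[r'']? with
          | some j => simp [pvIdx, hc, h] <;> omega
          | none => simp [pvIdx, hc, h] <;> omega
      · rw [show pvScan (c :: cs) (r' + 1) = 1 + pvScan cs (r' + 1) by
          simp [pvScan, hc]]
        rw [ih (r' + 1) (by omega)]
        cases h : (pvIdx cs)[r']? with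
        | some j => simp [pvIdx, hc, h] <;> omega
        | none => simp [pvIdx, hc, h] <;> omega

theorem pvFilterMap_enumerate : ∀ (cs : List Char) (s : Int),
    (PySem.List.enumerate cs s).filterMap (fun ic => if ic.2 == '>' then some ic.1 else none)
      = (pvIdx cs).map (fun j : Nat => s + (j : Int)) := by
  intro cs
  induction cs with
  | nil => intro s; simp [PySem.List.enumerate_nil, pvIdx]
  | cons c cs ih =>
    intro s
    rw [PySem.List.enumerate_cons, List.filterMap_cons]
    by_cases hc : c = '>'
    · simp only [hc, pvIdx, if_true, beq_self_eq_true, List.map_cons, List.map_map,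
        ih (s + 1)]
      refine congrArg₂ _ (by simp) ?_
      exact List.map_congr_left (fun j _ => by simp [Function.comp]; push_cast; ring)
    · have hcb : ((c == '>') = false) := by simp [hc]
      simp only [hcb, pvIdx, if_false, Bool.false_eq_true, List.map_map, ih (s + 1)]
      exact List.map_congr_left (fun j _ => by simp [Function.comp]; push_cast; ring)

-- ===== VERDICT (by name: the statement is the Claim_ definition above) =====
theorem new_cat3_spec : Claim_equal_new_cat3 := by
  intro s _
  unfold Spec_new_cat3 new_cat3 new_cat3_alt
  have hA : pvALoop s.toList 0 0 = pvScan s.toList 4 := by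
    have := pvALoop_eq_scan s.toList 4 0 (by omega)
    simpa using this
  rw [hA, pvFilterMap_enumerate s.toList 0]
  have hscan := pvScan_idx s.toList 4 (by omega)
  have h3 : ((3 : Int)) = ((3 : Nat) : Int) := by norm_num
  cases h : (pvIdx s.toList)[3]? with
  | some j =>
    have hlen : 4 ≤ (pvIdx s.toList).length := by
      obtain ⟨hlt, -⟩ := List.getElem?_eq_some_iff.mp h
      omega
    norm_num at hscan
    simp only [h, Option.map_some, Option.getD_some] at hscan
    rw [hscan, if_neg (by simp; omega)]
    rw [h3, PySem.List.pyGet?_natCast]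
    simp [List.getElem?_map, h]
    push_cast; ring
  | none =>
    have hlen : (pvIdx s.toList).length ≤ 3 := by
      by_contra hcon
      have := List.getElem?_eq_getElem (l := pvIdx s.toList) (i := 3) (by omega)
      simp [this] at h
    norm_num at hscan
    simp only [h, Option.map_none, Option.getD_none] at hscan
    rw [hscan, if_pos (by simp; omega)]
    simp [PySem.Str.len_eq]
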